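-- pv_equiv track=rewrite | github.com/shinminje20/IMLE-Unconditional-Implicit-Maximum-Likelihood-Estimation | utils/Utils.py | has_resolution
-- ===== SOURCE A (Python) =====
-- def has_resolution(data_str):
--     """Returns if [data_str] has a resolution."""
--     if not "x" in data_str:
--         return False
--     else:
--         x_idxs = [idx for idx,c in enumerate(data_str) if c == "x"]
--         for x_idx in x_idxs:
--             for n in range(1, min(x_idx, len(data_str) - x_idx)):
--                 res1 = data_str[x_idx - n:x_idx]
--                 res2 = data_str[x_idx + 1:x_idx + 1 + n]
--                 if res1.isdigit() and res2.isdigit():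
--                     return True
--                 else:
--                     break
--         return False
-- ===== SOURCE B (Python) =====
-- def has_resolution(data_str):
--     """Returns if [data_str] has a resolution."""
--     for prev, cur, nxt in zip(data_str, data_str[1:], data_str[2:]):
--         if cur == "x" and prev.isdigit() and nxt.isdigit():
--             return True
--     return False
-- ===== Notes on version B (the rewrite author's own statement) =====
-- stated objective: simpler
-- what changed: Replaced the x-index list plus the degenerate nested break-loop (whose inner loop only ever tests n=1) by one sliding-window pass over consecutive (prev,cur,next) character triples.
-- intended difference: On strings whose only digit-x-digit occurrence has the letter x at index 1 (e.g. '1x2'), A returns False because its search radius min(x_idx, len-x_idx) needs two characters on each side of the x, while B returns True, the intended answer since such strings do contain an NxM resolution pattern. — e.g. on has_resolution("1x2"): A returns false, B returns true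
import Mathlib
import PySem

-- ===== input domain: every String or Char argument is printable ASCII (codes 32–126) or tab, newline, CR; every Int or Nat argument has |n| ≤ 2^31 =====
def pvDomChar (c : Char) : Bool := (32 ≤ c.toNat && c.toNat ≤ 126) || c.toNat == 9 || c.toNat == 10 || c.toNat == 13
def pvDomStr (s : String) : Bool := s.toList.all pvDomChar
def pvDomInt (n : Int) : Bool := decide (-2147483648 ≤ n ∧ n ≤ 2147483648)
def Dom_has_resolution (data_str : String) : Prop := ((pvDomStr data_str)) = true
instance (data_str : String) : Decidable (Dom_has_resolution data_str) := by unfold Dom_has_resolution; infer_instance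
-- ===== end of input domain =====

-- B replaces A's x-index list and degenerate nested break-loop (only n = 1 is ever tested)
-- by one sliding-window pass over consecutive character triples (objective: simpler).

-- ===== PORT A =====
-- inner 'for n in range(...)' loop: some true on 'return True', none on break/exhaustion
def hrInnerLoop (cs : List Char) (x_idx : Int) : List Int → Option Bool
  | [] => none
  | n :: _ =>
    let res1 := PySem.List.slice cs (some (x_idx - n)) (some x_idx)
    let res2 := PySem.List.slice cs (some (x_idx + 1)) (some (x_idx + 1 + n))
    if PySem.Chars.strIsdigit res1 && PySem.Chars.strIsdigit res2 then some true
    else none  -- break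

-- outer 'for x_idx in x_idxs' loop
def hrOuterLoop (cs : List Char) : List Int → Bool
  | [] => false
  | x_idx :: rest =>
    match hrInnerLoop cs x_idx (PySem.List.pyRange 1 (min x_idx ((cs.length : Int) - x_idx)) 1) with
    | some b => b
    | none => hrOuterLoop cs rest

def has_resolution (data_str : String) : Bool :=
  if !(PySem.Str.isIn "x" data_str) then false
  else
    let cs := data_str.toList
    let x_idxs := ((PySem.List.enumerate cs 0).filter (fun p => p.2 == 'x')).map (fun p => p.1)
    hrOuterLoop cs x_idxs

-- ===== PORT B =====
def has_resolution_alt (data_str : String) : Bool :=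
  let cs := data_str.toList
  ((cs.zip (cs.drop 1)).zip (cs.drop 2)).any
    (fun t => t.1.2 == 'x' && PySem.Chars.isdigit t.1.1 && PySem.Chars.isdigit t.2)

-- ===== PRECONDITION & SPEC =====
-- digit-'x'-digit pattern centred at index i (out-of-range reads give ' ', which is neither)
def pvPatt (cs : List Char) (i : Nat) : Bool :=
  (cs.getD i ' ' == 'x') && PySem.Chars.isdigit (cs.getD (i - 1) ' ') && PySem.Chars.isdigit (cs.getD (i + 1) ' ')

-- On strings whose only digit-x-digit occurrence has the letter x at index 1 (e.g. "1x2"),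
-- A returns false because its search radius min(x_idx, len-x_idx) needs two characters on
-- each side of the x, while B returns true, the intended answer since such strings do
-- contain an NxM resolution pattern.
def D_has_resolution (data_str : String) : Prop :=
  pvPatt data_str.toList 1 = true ∧
  ∀ i, i < data_str.toList.length → 2 ≤ i → pvPatt data_str.toList i = false

instance (data_str : String) : Decidable (D_has_resolution data_str) := by
  unfold D_has_resolution; infer_instance

def Spec_has_resolution (data_str : String) (out : Bool) : Prop :=
  ¬ D_has_resolution data_str → out = has_resolution_alt data_str
instance (data_str : String) (out : Bool) : Decidable (Spec_has_resolution data_str out) := by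
  unfold Spec_has_resolution; infer_instance

def pvDiffWitness_has_resolution : String := "1x2"
def pvDiffWitnessOut_has_resolution : Bool × Bool := (false, true)

-- ===== CLAIM (what is proved, stated in full; the proofs are below) =====
def Claim_unchanged_has_resolution : Prop :=
  ∀ (data_str : String), Dom_has_resolution data_str → Spec_has_resolution data_str (has_resolution data_str)
def Claim_changed_has_resolution : Prop :=
  Dom_has_resolution (pvDiffWitness_has_resolution) ∧ D_has_resolution (pvDiffWitness_has_resolution) ∧
  has_resolution (pvDiffWitness_has_resolution) = pvDiffWitnessOut_has_resolution.1 ∧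
  has_resolution_alt (pvDiffWitness_has_resolution) = pvDiffWitnessOut_has_resolution.2 ∧
  pvDiffWitnessOut_has_resolution.1 ≠ pvDiffWitnessOut_has_resolution.2
def Claim_exact_has_resolution : Prop :=
  ∀ (data_str : String), Dom_has_resolution data_str → D_has_resolution data_str →
    has_resolution data_str ≠ has_resolution_alt data_str

-- ===== LEMMAS AND PROOFS =====

theorem getD_eq_of_lt (cs : List Char) (i : Nat) (h : i < cs.length) : cs.getD i ' ' = cs[i] := by
  simp [List.getD_eq_getElem?_getD, List.getElem?_eq_getElem h]
theorem lt_of_patt_digit (cs : List Char) (i : Nat)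
    (h : PySem.Chars.isdigit (cs.getD i ' ') = true) : i < cs.length := by
  by_contra hc
  rw [List.getD_eq_getElem?_getD, List.getElem?_eq_none (by omega)] at h
  simp at h
  exact absurd h (by decide)

theorem pvPatt_false_of_ge (cs : List Char) (i : Nat) (h : cs.length ≤ i) : pvPatt cs i = false := by
  simp [pvPatt, List.getD_eq_getElem?_getD, List.getElem?_eq_none h]

theorem strIsdigit_singleton (c : Char) : PySem.Chars.strIsdigit [c] = PySem.Chars.isdigit c := by
  simp [PySem.Chars.strIsdigit]

theorem zip3_any_iff (cs : List Char) (f : (Char × Char) × Char → Bool) :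
    ((cs.zip (cs.drop 1)).zip (cs.drop 2)).any f = true ↔
      ∃ j : Nat, j + 2 < cs.length ∧ f ((cs[j]!, cs[(j+1)]!), cs[(j+2)]!) = true := by
  have hlen : ((cs.zip (cs.drop 1)).zip (cs.drop 2)).length = cs.length - 2 := by
    simp [List.length_zip, List.length_drop]; omega
  rw [List.any_eq_true]
  constructor
  · rintro ⟨t, ht, hf⟩
    rw [List.mem_iff_getElem] at ht
    obtain ⟨j, hj, hjt⟩ := ht
    rw [hlen] at hj
    refine ⟨j, by omega, ?_⟩
    have h2 : j + 2 < cs.length := by omega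
    have ht' : t = ((cs[j]!, cs[(j+1)]!), cs[(j+2)]!) := by
      rw [← hjt]
      rw [getElem!_pos cs j (by omega), getElem!_pos cs (j+1) (by omega), getElem!_pos cs (j+2) (by omega)]
      simp [List.getElem_zip, List.getElem_drop]
      first | rfl | (congr 1 <;> omega)
    rw [← ht']; exact hf
  · rintro ⟨j, hj, hf⟩
    refine ⟨((cs[j]!, cs[(j+1)]!), cs[(j+2)]!), ?_, hf⟩
    rw [List.mem_iff_getElem]
    refine ⟨j, by rw [hlen]; omega, ?_⟩
    rw [getElem!_pos cs j (by omega), getElem!_pos cs (j+1) (by omega), getElem!_pos cs (j+2) (by omega)]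
    simp [List.getElem_zip, List.getElem_drop]
    first | rfl | (congr 1 <;> omega)
theorem patt_succ_iff (cs : List Char) (j : Nat) :
    pvPatt cs (j + 1) = true ↔
      j + 2 < cs.length ∧ (cs[(j+1)]! == 'x' && PySem.Chars.isdigit cs[j]! && PySem.Chars.isdigit cs[(j+2)]!) = true := by
  constructor
  · intro hp
    have hp' := hp
    simp only [pvPatt, Bool.and_eq_true, beq_iff_eq] at hp'
    obtain ⟨⟨hx, hd1⟩, hd2⟩ := hp'
    have h2 : j + 2 < cs.length := lt_of_patt_digit _ _ hd2
    refine ⟨h2, ?_⟩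
    simp only [Nat.add_sub_cancel] at hx hd1
    rw [getD_eq_of_lt _ _ (by omega)] at hx hd1 hd2
    rw [getElem!_pos cs (j+1) (by omega), getElem!_pos cs j (by omega), getElem!_pos cs (j+2) (by omega)]
    simp [hx, hd1, hd2]
  · rintro ⟨h2, hf⟩
    rw [getElem!_pos cs (j+1) (by omega), getElem!_pos cs j (by omega), getElem!_pos cs (j+2) (by omega)] at hf
    simp only [pvPatt, Nat.add_sub_cancel]
    rw [getD_eq_of_lt _ _ (by omega), getD_eq_of_lt _ _ (by omega), getD_eq_of_lt _ _ (by omega)]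
    exact hf
theorem alt_iff (s : String) :
    has_resolution_alt s = true ↔ ∃ j : Nat, pvPatt s.toList (j + 1) = true := by
  rw [has_resolution_alt, zip3_any_iff]
  constructor
  · rintro ⟨j, hj, hf⟩
    exact ⟨j, (patt_succ_iff _ _).2 ⟨hj, hf⟩⟩
  · rintro ⟨j, hp⟩
    obtain ⟨hj, hf⟩ := (patt_succ_iff _ _).1 hp
    exact ⟨j, hj, hf⟩
theorem inner_eq_some (cs : List Char) (i : Int) (r : List Int) (b : Bool)
    (h : hrInnerLoop cs i r = some b) : b = true := by
  cases r with
  | nil => simp [hrInnerLoop] at h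
  | cons n rest =>
    simp only [hrInnerLoop] at h
    split_ifs at h <;> simp_all
theorem outer_iff (cs : List Char) (l : List Int) :
    hrOuterLoop cs l = true ↔
      ∃ i ∈ l, hrInnerLoop cs i (PySem.List.pyRange 1 (min i ((cs.length : Int) - i)) 1) = some true := by
  induction l with
  | nil => simp [hrOuterLoop]
  | cons i rest ih =>
    simp only [hrOuterLoop]
    cases h : hrInnerLoop cs i (PySem.List.pyRange 1 (min i ((cs.length : Int) - i)) 1) with
    | none =>
      simp only [h]
      rw [ih]
      constructor
      · rintro ⟨j, hj, hij⟩; exact ⟨j, List.mem_cons_of_mem _ hj, hij⟩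
      · rintro ⟨j, hj, hij⟩
        rcases List.mem_cons.1 hj with rfl | hj'
        · rw [hij] at h; simp at h
        · exact ⟨j, hj', hij⟩
    | some b =>
      have := inner_eq_some cs i _ b h
      subst this
      simp [h]
theorem take_one_drop (cs : List Char) (k : Nat) (h : k < cs.length) :
    (cs.drop k).take 1 = [cs[k]!] := by
  rw [getElem!_pos cs k h, List.drop_eq_getElem_cons h]
  rfl
theorem inner_char (cs : List Char) (k : Nat) (hk : k < cs.length) (hx : cs[k]! = 'x') :
    (hrInnerLoop cs (k : Int) (PySem.List.pyRange 1 (min (k : Int) ((cs.length : Int) - k)) 1) = some true)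
      ↔ (2 ≤ k ∧ pvPatt cs k = true) := by
  by_cases h2 : 2 ≤ k ∧ k + 2 ≤ cs.length
  · obtain ⟨h2k, h2l⟩ := h2
    rw [PySem.List.pyRange_one_cons (by omega)]
    simp only [hrInnerLoop]
    have e1 : PySem.List.slice cs (some ((k : Int) - 1)) (some (k : Int)) = [cs[k-1]!] := by
      have : ((k : Int) - 1) = ((k - 1 : Nat) : Int) := by omega
      rw [this, PySem.List.slice_natCast]
      have : k - (k - 1) = 1 := by omega
      rw [this, take_one_drop cs (k-1) (by omega)]
    have e2 : PySem.List.slice cs (some ((k : Int) + 1)) (some ((k : Int) + 1 + 1)) = [cs[k+1]!] := by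
      have h1 : ((k : Int) + 1) = ((k + 1 : Nat) : Int) := by omega
      rw [h1]
      have hb : ((k + 1 : Nat) : Int) + 1 = ((k + 1 : Nat) : Int) + ((1 : Nat) : Int) := by omega
      rw [hb, PySem.List.slice_natCast_add, take_one_drop cs (k+1) (by omega)]
    rw [e1, e2, strIsdigit_singleton, strIsdigit_singleton]
    constructor
    · intro h
      split_ifs at h with hd
      · simp only [Bool.and_eq_true] at hd
        refine ⟨h2k, ?_⟩
        simp only [pvPatt]
        rw [getD_eq_of_lt _ _ (by omega), getD_eq_of_lt _ _ (by omega), getD_eq_of_lt _ _ (by omega)]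
        simp only [Bool.and_eq_true, beq_iff_eq]
        refine ⟨⟨?_, ?_⟩, ?_⟩
        · rw [← getElem!_pos cs k hk]; simp [hx]
        · rw [← getElem!_pos cs (k-1) (by omega)]
          exact hd.1
        · rw [← getElem!_pos cs (k+1) (by omega)]
          exact hd.2
    · rintro ⟨_, hp⟩
      simp only [pvPatt, Bool.and_eq_true, beq_iff_eq] at hp
      obtain ⟨⟨_, hd1⟩, hd2⟩ := hp
      rw [getD_eq_of_lt _ _ (by omega)] at hd1
      rw [getD_eq_of_lt _ _ (by omega)] at hd2
      rw [← getElem!_pos cs (k-1) (by omega)] at hd1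
      rw [← getElem!_pos cs (k+1) (by omega)] at hd2
      rw [hd1, hd2]
      rfl
  · -- min ≤ 1: empty range, inner = none; and RHS false
    have hm : min (k : Int) ((cs.length : Int) - k) ≤ 1 := by omega
    rw [PySem.List.pyRange_one_eq_nil (by omega)]
    simp only [hrInnerLoop]
    constructor
    · intro h; simp at h
    · rintro ⟨h2k, hp⟩
      exfalso
      simp only [pvPatt, Bool.and_eq_true, beq_iff_eq] at hp
      have := lt_of_patt_digit cs (k+1) hp.2
      omega
theorem mem_xidxs (cs : List Char) (i : Int) :
    i ∈ ((PySem.List.enumerate cs 0).filter (fun p => p.2 == 'x')).map (fun p => p.1) ↔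
      ∃ k : Nat, k < cs.length ∧ i = (k : Int) ∧ cs[k]! = 'x' := by
  simp only [List.mem_map, List.mem_filter, PySem.List.mem_enumerate_iff]
  constructor
  · rintro ⟨p, ⟨⟨k, hk, rfl⟩, hx⟩, rfl⟩
    refine ⟨k, hk, by omega, ?_⟩
    rw [getElem!_pos cs k hk]; simpa using hx
  · rintro ⟨k, hk, rfl, hx⟩
    refine ⟨((k : Int), cs[k]), ⟨⟨k, hk, by simp⟩, ?_⟩, rfl⟩
    rw [getElem!_pos cs k hk] at hx; simp [hx]
theorem a_iff (s : String) :
    has_resolution s = true ↔ ∃ i : Nat, 2 ≤ i ∧ pvPatt s.toList i = true := by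
  simp only [has_resolution]
  split_ifs with hg
  · -- no 'x' in the string
    simp only [Bool.not_eq_eq_eq_not, Bool.not_true] at hg
    constructor
    · intro h; simp at h
    · rintro ⟨i, _, hp⟩
      exfalso
      simp only [pvPatt, Bool.and_eq_true, beq_iff_eq] at hp
      have hx := hp.1.1
      have hilt : i < s.toList.length := by
        by_contra hc
        rw [List.getD_eq_getElem?_getD, List.getElem?_eq_none (by omega)] at hx
        simp at hx
      rw [getD_eq_of_lt _ _ hilt] at hx
      have hmem : 'x' ∈ s.toList := hx ▸ List.getElem_mem hilt
      obtain ⟨pre, suf, hps⟩ := List.append_of_mem hmem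
      have : PySem.Str.isIn "x" s = true := by
        simp only [PySem.Str.isIn_eq]
        rw [PySem.Chars.isIn_iff_infix]
        exact ⟨pre, suf, by simpa using hps.symm⟩
      simp_all
  · rw [outer_iff]
    constructor
    · rintro ⟨i, hmem, hinner⟩
      obtain ⟨k, hk, rfl, hx⟩ := (mem_xidxs _ _).1 hmem
      obtain ⟨h2, hp⟩ := (inner_char s.toList k hk hx).1 hinner
      exact ⟨k, h2, hp⟩
    · rintro ⟨k, h2, hp⟩
      have hxg := hp
      simp only [pvPatt, Bool.and_eq_true, beq_iff_eq] at hxg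
      have hx := hxg.1.1
      have hk : k < s.toList.length := by
        by_contra hc
        rw [List.getD_eq_getElem?_getD, List.getElem?_eq_none (by omega)] at hx
        simp at hx
      rw [getD_eq_of_lt _ _ hk] at hx
      have hx' : s.toList[k]! = 'x' := by rw [getElem!_pos _ k hk]; exact hx
      exact ⟨(k : Int), (mem_xidxs _ _).2 ⟨k, hk, rfl, hx'⟩,
        (inner_char s.toList k hk hx').2 ⟨h2, hp⟩⟩

-- ===== VERDICT (by name: the statement is the Claim_ definition above) =====
theorem has_resolution_spec : Claim_unchanged_has_resolution := by
  intro s _ hnd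
  rw [Bool.eq_iff_iff, a_iff, alt_iff]
  constructor
  · rintro ⟨i, h2, hp⟩
    refine ⟨i - 1, ?_⟩
    have hi : i - 1 + 1 = i := by omega
    rw [hi]; exact hp
  · rintro ⟨j, hp⟩
    rcases Nat.eq_zero_or_pos j with rfl | hj
    · unfold D_has_resolution at hnd
      push Not at hnd
      obtain ⟨i, _, h2, hpi⟩ := hnd (by simpa using hp)
      exact ⟨i, h2, by simpa using hpi⟩
    · exact ⟨j + 1, by omega, hp⟩

theorem has_resolution_changed : Claim_changed_has_resolution := by
  unfold Claim_changed_has_resolution; decide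

theorem has_resolution_tight : Claim_exact_has_resolution := by
  intro s _ hd
  obtain ⟨h1, h2⟩ := hd
  have hb : has_resolution_alt s = true := (alt_iff s).2 ⟨0, h1⟩
  have ha : has_resolution s = false := by
    rw [← Bool.not_eq_true, a_iff]
    rintro ⟨i, hi2, hpi⟩
    by_cases hlt : i < s.toList.length
    · exact absurd hpi (by simp [h2 i hlt hi2])
    · exact absurd hpi (by simp [pvPatt_false_of_ge s.toList i (by omega)])
  rw [ha, hb]; simp
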